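-- pv_equiv track=rewrite | github.com/narnolddd/adventOfCode | 2019/Day13/rgc.py | moveBat
-- ===== SOURCE A (Python) =====
-- def moveBat(out):
--     bx=0
--     px=0
--     for i in range(0,len(out),3):
--         x= out[i]
--         y= out[i+1]
--         if x == -1 and y == 0:
--             continue
--         elif out[i+2] == 3:
--             px=x
--         elif out[i+2] == 4:
--             bx=x
--     if bx < px:
--         return -1
--     if bx > px:
--         return 1
--     return 0
-- ===== SOURCE B (Python) =====
-- def moveBat(out):
--     bx = None
--     px = None
--     n3 = 3 * (len(out) // 3)
--     for i in range(n3 - 3, -1, -3):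
--         x = out[i]
--         y = out[i + 1]
--         t = out[i + 2]
--         if x == -1 and y == 0:
--             continue
--         if t == 4 and bx is None:
--             bx = x
--         elif t == 3 and px is None:
--             px = x
--         if bx is not None and px is not None:
--             break
--     if bx is None:
--         bx = 0
--     if px is None:
--         px = 0
--     if bx < px:
--         return -1
--     if bx > px:
--         return 1
--     return 0
-- ===== Notes on version B (the rewrite author's own statement) =====
-- stated objective: alternative
-- what changed: B scans the complete triples from the back, recording the first (i.e. chronologically last) ball and paddle x it meets and breaking as soon as both are known, instead of A's forward sweep that overwrites px/bx on every tile; Pre_ restricts to lengths on which A does not raise IndexError.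
import Mathlib
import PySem

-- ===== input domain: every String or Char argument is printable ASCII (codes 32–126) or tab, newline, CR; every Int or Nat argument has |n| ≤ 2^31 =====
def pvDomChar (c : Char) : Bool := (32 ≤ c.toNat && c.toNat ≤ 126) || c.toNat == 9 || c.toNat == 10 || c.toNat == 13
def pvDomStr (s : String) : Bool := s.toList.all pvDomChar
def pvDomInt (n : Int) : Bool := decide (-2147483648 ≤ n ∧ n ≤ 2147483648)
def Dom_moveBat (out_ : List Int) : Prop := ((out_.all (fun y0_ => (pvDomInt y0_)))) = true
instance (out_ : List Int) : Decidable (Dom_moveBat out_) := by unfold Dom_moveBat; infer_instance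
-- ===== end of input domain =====

-- B scans the complete triples from the back with an early break instead of A's
-- overwrite-forward sweep; equal on all inputs where A returns (Pre_ below).

-- ===== PORT A =====
def moveBat (out_ : List Int) : Int :=
  let bp := (PySem.List.pyRange 0 (PySem.List.len out_) 3).foldl
    (fun (s : Int × Int) i =>
      let x := PySem.List.pyGetD out_ i 0
      let y := PySem.List.pyGetD out_ (i + 1) 0
      if x = -1 ∧ y = 0 then s
      else if PySem.List.pyGetD out_ (i + 2) 0 = 3 then (s.1, x)
      else if PySem.List.pyGetD out_ (i + 2) 0 = 4 then (x, s.2)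
      else s) (0, 0)
  if bp.1 < bp.2 then -1 else if bp.1 > bp.2 then 1 else 0

-- ===== PORT B =====
-- backward scan over the index list, with the loop's `break` as an early return
def bScan (out_ : List Int) : List Int → Option Int × Option Int → Option Int × Option Int
  | [], s => s
  | i :: rest, s =>
      let x := PySem.List.pyGetD out_ i 0
      let y := PySem.List.pyGetD out_ (i + 1) 0
      let t := PySem.List.pyGetD out_ (i + 2) 0
      let s' := if x = -1 ∧ y = 0 then s
                else if t = 4 ∧ s.1 = none then (some x, s.2)
                else if t = 3 ∧ s.2 = none then (s.1, some x)
                else s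
      if s'.1.isSome ∧ s'.2.isSome then s' else bScan out_ rest s'

def moveBat_alt (out_ : List Int) : Int :=
  let n3 := 3 * PySem.Int.floordiv (PySem.List.len out_) 3
  let s := bScan out_ (PySem.List.pyRange (n3 - 3) (-1) (-3)) (none, none)
  let bx := s.1.getD 0
  let px := s.2.getD 0
  if bx < px then -1 else if bx > px then 1 else 0

-- ===== PRECONDITION & SPEC =====
-- Pre_ excludes exactly the inputs where A raises IndexError: lengths ≢ 0 (mod 3),
-- except length ≡ 2 (mod 3) when the trailing pair is (-1, 0) (A skips it unread).
def Pre_moveBat (out_ : List Int) : Prop :=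
  out_.length % 3 = 0 ∨
    (out_.length % 3 = 2 ∧ out_.getD (out_.length - 2) 1 = -1 ∧ out_.getD (out_.length - 1) 1 = 0)
instance (out_ : List Int) : Decidable (Pre_moveBat out_) := by unfold Pre_moveBat; infer_instance
def pvWitness_moveBat : List Int := [4, 2, 4, 7, 2, 3]
def Spec_moveBat (out_ : List Int) (out : Int) : Prop := out = moveBat_alt out_
instance (out_ : List Int) (out : Int) : Decidable (Spec_moveBat out_ out) := by unfold Spec_moveBat; infer_instance

-- ===== CLAIM (what is proved, stated in full; the proofs are below) =====
def Claim_equal_moveBat : Prop := ∀ (out_ : List Int), Dom_moveBat out_ → Pre_moveBat out_ → Spec_moveBat out_ (moveBat out_)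

-- ===== LEMMAS AND PROOFS =====

-- the (x, y, tile) values of the k-th complete triple
def chunkAt (xs : List Int) (k : Nat) : Int × Int × Int :=
  (xs.getD (3 * k) 0, xs.getD (3 * k + 1) 0, xs.getD (3 * k + 2) 0)

-- A's loop body on a triple
def fA (s : Int × Int) (t : Int × Int × Int) : Int × Int :=
  if t.1 = -1 ∧ t.2.1 = 0 then s
  else if t.2.2 = 3 then (s.1, t.1)
  else if t.2.2 = 4 then (t.1, s.2)
  else s

-- B's loop body on a triple (without the break)
def fB (s : Option Int × Option Int) (t : Int × Int × Int) : Option Int × Option Int :=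
  if t.1 = -1 ∧ t.2.1 = 0 then s
  else if t.2.2 = 4 ∧ s.1 = none then (some t.1, s.2)
  else if t.2.2 = 3 ∧ s.2 = none then (s.1, some t.1)
  else s

-- B's triple scan (the break kept)
def cScan : List (Int × Int × Int) → Option Int × Option Int → Option Int × Option Int
  | [], s => s
  | t :: rest, s =>
      let s' := fB s t
      if s'.1.isSome ∧ s'.2.isSome then s' else cScan rest s'

-- casting the i+1 / i+2 offsets of an index 3k
theorem pyGetD_shift (xs : List Int) (k : Nat) :
    PySem.List.pyGetD xs (((3 * k : Nat) : Int) + 1) 0 = xs.getD (3 * k + 1) 0 ∧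
    PySem.List.pyGetD xs (((3 * k : Nat) : Int) + 2) 0 = xs.getD (3 * k + 2) 0 := by
  constructor
  · have e : ((3 * k : Nat) : Int) + 1 = ((3 * k + 1 : Nat) : Int) := by push_cast; ring
    rw [e, PySem.List.pyGetD_natCast]
  · have e : ((3 * k : Nat) : Int) + 2 = ((3 * k + 2 : Nat) : Int) := by push_cast; ring
    rw [e, PySem.List.pyGetD_natCast]

-- A's fold over indices 3k, k ∈ l, is fA over the corresponding triples
theorem foldA_chunks (xs : List Int) (l : List Nat) (s : Int × Int) :
    (l.map (fun k => ((3 * k : Nat) : Int))).foldl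
      (fun (s : Int × Int) i =>
        let x := PySem.List.pyGetD xs i 0
        let y := PySem.List.pyGetD xs (i + 1) 0
        if x = -1 ∧ y = 0 then s
        else if PySem.List.pyGetD xs (i + 2) 0 = 3 then (s.1, x)
        else if PySem.List.pyGetD xs (i + 2) 0 = 4 then (x, s.2)
        else s) s
    = (l.map (chunkAt xs)).foldl fA s := by
  induction l generalizing s with
  | nil => rfl
  | cons k l ih =>
    rw [List.map_cons, List.map_cons, List.foldl_cons, List.foldl_cons, ← ih]
    congr 1
    simp only [PySem.List.pyGetD_natCast, (pyGetD_shift xs k).1, (pyGetD_shift xs k).2, fA, chunkAt]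

-- B's scan over indices 3k, k ∈ l, is the triple scan over the same chunks
theorem bScan_chunks (xs : List Int) (l : List Nat) (s : Option Int × Option Int) :
    bScan xs (l.map (fun k => ((3 * k : Nat) : Int))) s = cScan (l.map (chunkAt xs)) s := by
  induction l generalizing s with
  | nil => rfl
  | cons k l ih =>
    rw [List.map_cons, List.map_cons]
    show (let x := PySem.List.pyGetD xs ((3 * k : Nat) : Int) 0
          let y := PySem.List.pyGetD xs (((3 * k : Nat) : Int) + 1) 0
          let t := PySem.List.pyGetD xs (((3 * k : Nat) : Int) + 2) 0
          let s' := if x = -1 ∧ y = 0 then s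
                    else if t = 4 ∧ s.1 = none then (some x, s.2)
                    else if t = 3 ∧ s.2 = none then (s.1, some x)
                    else s
          if s'.1.isSome ∧ s'.2.isSome then s'
          else bScan xs (l.map (fun k => ((3 * k : Nat) : Int))) s') = _
    simp only [PySem.List.pyGetD_natCast, (pyGetD_shift xs k).1, (pyGetD_shift xs k).2, ih]
    rfl

-- fB fixes a fully-determined state
theorem foldl_fB_fixed (l : List (Int × Int × Int)) (s : Option Int × Option Int)
    (h1 : s.1.isSome) (h2 : s.2.isSome) : l.foldl fB s = s := by
  induction l with
  | nil => rfl
  | cons t rest ih =>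
    have hf : fB s t = s := by
      simp only [fB]
      split_ifs with a b c <;> first | rfl | simp_all
    rw [List.foldl_cons, hf, ih]

-- the break is a no-op: cScan is the plain fold
theorem cScan_eq_foldl (l : List (Int × Int × Int)) (s : Option Int × Option Int) :
    cScan l s = l.foldl fB s := by
  induction l generalizing s with
  | nil => rfl
  | cons t rest ih =>
    show (let s' := fB s t
          if s'.1.isSome ∧ s'.2.isSome then s' else cScan rest s') = _
    rw [List.foldl_cons]
    by_cases h : (fB s t).1.isSome ∧ (fB s t).2.isSome
    · rw [if_pos h, foldl_fB_fixed rest (fB s t) h.1 h.2]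
    · simp only [if_neg h]
      exact ih (fB s t)

-- last-write-wins forward = first-write-wins backward
theorem core (ts : List (Int × Int × Int)) (b p : Int) :
    ts.foldl fA (b, p) =
      ((ts.reverse.foldl fB (none, none)).1.getD b, (ts.reverse.foldl fB (none, none)).2.getD p) := by
  induction ts generalizing b p with
  | nil => simp
  | cons t ts ih =>
    rw [List.foldl_cons, List.reverse_cons, List.foldl_append]
    obtain ⟨x, y, u⟩ := t
    by_cases hs : x = -1 ∧ y = 0
    · have hfa : fA (b, p) (x, y, u) = (b, p) := by simp [fA, hs]
      have hfb : fB (ts.reverse.foldl fB (none, none)) (x, y, u)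
          = ts.reverse.foldl fB (none, none) := by simp [fB, hs]
      rw [hfa, ih, List.foldl_cons, hfb]
      simp
    · by_cases h3 : u = 3
      · have hfa : fA (b, p) (x, y, u) = (b, x) := by simp [fA, hs, h3]
        rw [hfa, ih, List.foldl_cons]
        rcases hG : ts.reverse.foldl fB (none, none) with ⟨ob, op⟩
        cases op with
        | none => simp [fB, hs, h3]
        | some v => simp [fB, hs, h3]
      · by_cases h4 : u = 4
        · have hfa : fA (b, p) (x, y, u) = (x, p) := by simp [fA, hs, h4]
          rw [hfa, ih, List.foldl_cons]
          rcases hG : ts.reverse.foldl fB (none, none) with ⟨ob, op⟩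
          cases ob with
          | none => simp [fB, hs, h4]
          | some v => simp [fB, hs, h4]
        · have hfa : fA (b, p) (x, y, u) = (b, p) := by simp [fA, hs, h3, h4]
          have hfb : fB (ts.reverse.foldl fB (none, none)) (x, y, u)
              = ts.reverse.foldl fB (none, none) := by simp [fB, hs, h3, h4]
          rw [hfa, ih, List.foldl_cons, hfb]
          simp

-- the complete triples of xs
def chunk3 : List Int → List (Int × Int × Int)
  | a :: b :: c :: rest => (a, b, c) :: chunk3 rest
  | _ => []

theorem chunk3_eq_map (xs : List Int) :
    (List.range (xs.length / 3)).map (chunkAt xs) = chunk3 xs := by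
  induction xs using chunk3.induct with
  | case1 a b c rest ih =>
    have hlen : (a :: b :: c :: rest).length / 3 = rest.length / 3 + 1 := by
      simp [List.length_cons]; omega
    rw [hlen, List.range_succ_eq_map, List.map_cons, List.map_map]
    have h0 : chunkAt (a :: b :: c :: rest) 0 = (a, b, c) := by simp [chunkAt]
    have hsh : (chunkAt (a :: b :: c :: rest)) ∘ Nat.succ = chunkAt rest := by
      funext k
      have e0 : 3 * (k + 1) = 3 * k + 2 + 1 := by ring
      simp [chunkAt, Function.comp, Nat.succ_eq_add_one, e0]
    rw [h0, hsh, ih, chunk3]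
  | case2 xs h =>
    rcases xs with _ | ⟨a, _ | ⟨b, _ | ⟨c, r⟩⟩⟩
    · rfl
    · simp [chunk3]
    · simp [chunk3]
    · exact absurd rfl (h a b c r)

theorem pyRange_up3 (n : Nat) :
    PySem.List.pyRange 0 (n : Int) 3 = (List.range ((n + 2) / 3)).map (fun k => ((3 * k : Nat) : Int)) := by
  rw [PySem.List.pyRange_of_pos 0 (n : Int) (by norm_num)]
  have hc : (if (0 : Int) < (n : Int) then (((n : Int) - 0 + 3 - 1) / 3).toNat else 0) = (n + 2) / 3 := by
    split_ifs with h <;> omega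
  rw [hc]
  apply List.map_congr_left
  intro k _
  push_cast
  ring

theorem pyRange_down3 (q : Nat) :
    PySem.List.pyRange (3 * (q : Int) - 3) (-1) (-3)
      = ((List.range q).reverse).map (fun k => ((3 * k : Nat) : Int)) := by
  simp only [PySem.List.pyRange]
  norm_num
  have hc : (if (3 : Int) < 1 + 3 * (q : Int) then ((3 * (q : Int) - 3 + 1 + 3 - 1) / 3).toNat else 0) = q := by
    split_ifs with h <;> omega
  rw [hc]
  apply List.ext_getElem
  · simp
  · intro i h1 h2
    simp only [List.getElem_map, List.getElem_range, List.getElem_reverse, List.length_map,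
      List.length_range] at *
    simp only [List.length_map, List.length_range] at h1
    omega

-- A's fold over its full index range equals fA over the complete triples, under Pre_
theorem foldA_pre (xs : List Int) (hpre : Pre_moveBat xs) :
    (PySem.List.pyRange 0 (xs.length : Int) 3).foldl
      (fun (s : Int × Int) i =>
        let x := PySem.List.pyGetD xs i 0
        let y := PySem.List.pyGetD xs (i + 1) 0
        if x = -1 ∧ y = 0 then s
        else if PySem.List.pyGetD xs (i + 2) 0 = 3 then (s.1, x)
        else if PySem.List.pyGetD xs (i + 2) 0 = 4 then (x, s.2)
        else s) (0, 0)
    = (chunk3 xs).foldl fA (0, 0) := by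
  rw [pyRange_up3, foldA_chunks]
  rcases hpre with h0 | ⟨h2, hx, hy⟩
  · have : (xs.length + 2) / 3 = xs.length / 3 := by omega
    rw [this, chunk3_eq_map]
  · have hq : (xs.length + 2) / 3 = xs.length / 3 + 1 := by omega
    rw [hq, List.range_succ, List.map_append, List.foldl_append, chunk3_eq_map]
    have h3q : 3 * (xs.length / 3) = xs.length - 2 := by omega
    have hxv : xs.getD (3 * (xs.length / 3)) 0 = -1 := by
      rw [h3q, List.getD_eq_getElem xs 0 (by omega), ← hx,
        List.getD_eq_getElem xs 1 (by omega)]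
    have hyv : xs.getD (3 * (xs.length / 3) + 1) 0 = 0 := by
      rw [h3q]
      have e : xs.length - 2 + 1 = xs.length - 1 := by omega
      rw [e, List.getD_eq_getElem xs 0 (by omega), ← hy,
        List.getD_eq_getElem xs 1 (by omega)]
    have hch : chunkAt xs (xs.length / 3) = (-1, 0, xs.getD (3 * (xs.length / 3) + 2) 0) := by
      unfold chunkAt
      rw [hxv, hyv]
    simp only [List.map_cons, List.map_nil, List.foldl_cons, List.foldl_nil, hch]
    simp [fA]

-- ===== VERDICT (by name: the statement is the Claim_ definition above) =====
theorem moveBat_spec : Claim_equal_moveBat := by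
  intro xs _ hpre
  unfold Spec_moveBat moveBat moveBat_alt
  have hlen : PySem.List.len xs = (xs.length : Int) := PySem.List.len_eq xs
  have hfd : PySem.Int.floordiv (xs.length : Int) 3 = ((xs.length / 3 : Nat) : Int) := by
    exact_mod_cast PySem.Int.floordiv_natCast xs.length 3
  rw [hlen, hfd, foldA_pre xs hpre]
  simp only [pyRange_down3]
  rw [bScan_chunks, List.map_reverse, chunk3_eq_map, cScan_eq_foldl, core]
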